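-- pv_equiv track=rewrite | github.com/AtharSayed/Der-Kurator | evaluation/evaluate.py | is_abstention
-- ===== SOURCE A (Python) =====
-- def is_abstention(answer: str) -> bool:
--     patterns = [
--         "i don't know", "not found", "not provided", "no information",
--         "cannot determine", "based on the provided", "not mentioned",
--         "insufficient", "no clear", "unable to answer"
--     ]
--     a = answer.lower()
--     return any(p in a for p in patterns)
-- ===== SOURCE B (Python) =====
-- PATTERNS = [
--     "i don't know", "not found", "not provided", "no information",
--     "cannot determine", "based on the provided", "not mentioned",
--     "insufficient", "no clear", "unable to answer"
-- ]
--
-- def is_abstention(answer: str) -> bool: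
--     a = answer.lower()
--     # single left-to-right scan: at each position, test whether any pattern starts there
--     return any(a.startswith(p, i) for i in range(len(a) + 1) for p in PATTERNS)
-- ===== Notes on version B (the rewrite author's own statement) =====
-- stated objective: alternative
-- what changed: Replaces the pattern-driven loop of per-pattern substring searches with a single position-driven left-to-right scan of the lowercased answer that tests at each position whether any pattern starts there (the way a compiled regex alternation matches).
import Mathlib
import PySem

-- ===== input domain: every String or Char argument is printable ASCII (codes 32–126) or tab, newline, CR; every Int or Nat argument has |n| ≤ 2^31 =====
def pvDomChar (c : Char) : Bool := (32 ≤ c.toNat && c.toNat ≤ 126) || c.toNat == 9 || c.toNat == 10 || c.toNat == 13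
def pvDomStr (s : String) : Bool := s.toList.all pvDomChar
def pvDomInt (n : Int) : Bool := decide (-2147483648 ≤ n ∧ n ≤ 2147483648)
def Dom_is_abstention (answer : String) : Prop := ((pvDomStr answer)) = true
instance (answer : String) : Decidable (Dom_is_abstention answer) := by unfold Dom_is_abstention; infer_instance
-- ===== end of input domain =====

-- B replaces the per-pattern substring loop by a single left-to-right scan that tests each
-- pattern as a prefix at every position (objective: alternative, same result, no speed claim).


-- ===== PORT A =====
def pvPatternsA : List String :=
  ["i don't know", "not found", "not provided", "no information",
   "cannot determine", "based on the provided", "not mentioned",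
   "insufficient", "no clear", "unable to answer"]

-- literal port of A: lowercase, then any(p in a for p in patterns)
def is_abstention (answer : String) : Bool :=
  let a := PySem.Str.lower answer
  pvPatternsA.any (fun p => PySem.Str.isIn p a)

-- ===== PORT B =====
def pvPatternsB : List (List Char) :=
  ["i don't know".toList, "not found".toList, "not provided".toList, "no information".toList,
   "cannot determine".toList, "based on the provided".toList, "not mentioned".toList,
   "insufficient".toList, "no clear".toList, "unable to answer".toList]

-- B's loop 'for i in range(len(a)+1): any(a.startswith(p, i) …)' as structural recursion over
-- the suffixes of a (a.startswith(p, i) is exactly 'p is a prefix of the suffix at i'); exact.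
def pvScanB (pats : List (List Char)) : List Char → Bool
  | [] => pats.any (fun p => p.isPrefixOf [])
  | c :: rest => pats.any (fun p => p.isPrefixOf (c :: rest)) || pvScanB pats rest

def is_abstention_alt (answer : String) : Bool :=
  let a := PySem.Str.lower answer
  pvScanB pvPatternsB a.toList

-- ===== PRECONDITION & SPEC =====
def Spec_is_abstention (answer : String) (out : Bool) : Prop := out = is_abstention_alt answer
instance (answer : String) (out : Bool) : Decidable (Spec_is_abstention answer out) := by unfold Spec_is_abstention; infer_instance

-- ===== CLAIM (what is proved, stated in full; the proofs are below) =====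
def Claim_equal_is_abstention : Prop := ∀ (answer : String), Dom_is_abstention answer → Spec_is_abstention answer (is_abstention answer)

-- ===== LEMMAS AND PROOFS =====

-- B's scan finds exactly the patterns that are a prefix of some suffix of s
lemma pvScanB_eq_true_iff (pats : List (List Char)) (s : List Char) :
    pvScanB pats s = true ↔ ∃ p ∈ pats, ∃ j : Nat, p <+: s.drop j := by
  induction s with
  | nil =>
    simp [pvScanB, List.any_eq_true, List.isPrefixOf_iff_prefix]
  | cons c rest ih =>
    simp only [pvScanB, Bool.or_eq_true, ih, List.any_eq_true,
      List.isPrefixOf_iff_prefix]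
    constructor
    · rintro (⟨p, hp, hpre⟩ | ⟨p, hp, j, hpre⟩)
      · exact ⟨p, hp, 0, hpre⟩
      · exact ⟨p, hp, j + 1, hpre⟩
    · rintro ⟨p, hp, j, hpre⟩
      cases j with
      | zero => exact Or.inl ⟨p, hp, hpre⟩
      | succ j => exact Or.inr ⟨p, hp, j, hpre⟩

-- the two traversals agree on any pattern list and any string
lemma pvScan_eq_any_isIn (pats : List String) (s : List Char) :
    pats.any (fun p => PySem.Chars.isIn p.toList s) = pvScanB (pats.map String.toList) s := by
  rw [Bool.eq_iff_iff, pvScanB_eq_true_iff, List.any_eq_true]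
  constructor
  · rintro ⟨p, hp, hin⟩
    obtain ⟨j, hj⟩ := (PySem.Chars.exists_prefix_drop_iff_isIn p.toList s).mpr hin
    exact ⟨p.toList, List.mem_map_of_mem hp, j, hj⟩
  · rintro ⟨q, hq, j, hj⟩
    obtain ⟨p, hp, rfl⟩ := List.mem_map.mp hq
    exact ⟨p, hp, (PySem.Chars.exists_prefix_drop_iff_isIn p.toList s).mp ⟨j, hj⟩⟩

lemma pvPatterns_map : pvPatternsA.map String.toList = pvPatternsB := by decide

-- ===== VERDICT (by name: the statement is the Claim_ definition above) =====
theorem is_abstention_spec : Claim_equal_is_abstention := by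
  intro answer _
  unfold Spec_is_abstention is_abstention is_abstention_alt
  simp only [PySem.Str.isIn_eq]
  rw [pvScan_eq_any_isIn, pvPatterns_map]
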